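-- pv_equiv track=rewrite | github.com/linhdvu14/cp-sols | sols/CodeForces/2126_d3/C_I_Will_Definitely_Make_It.py | solve
-- ===== SOURCE A (Python) =====
-- def solve(N, K, H):
--     start = H[K - 1]
--     H = sorted(list(set(h for h in H if h >= start)))
--
--     lv = 1
--     for i in range(1, len(H)):
--         lv += H[i] - H[i - 1]
--         if lv - 1 > H[i - 1]: return 'NO'
--
--     return 'YES'
-- ===== SOURCE B (Python) =====
-- def solve(N, K, H):
--     start = H[K - 1]
--     # No sorting, no dedup: a tower h is unreachable exactly when h > start and
--     # no tower g lies in the window [h - start, h) with g >= start (a "close predecessor").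
--     if any(h > start and not any(start <= g < h <= g + start for g in H) for h in H):
--         return 'NO'
--     return 'YES'
-- ===== Notes on version B (the rewrite author's own statement) =====
-- stated objective: alternative
-- what changed: Replaced sort+dedup+adjacent-gap scan by a sort-free quadratic predecessor search: answer is NO iff some height h > start has no other height g with start <= g < h and h - g <= start; trades the O(n log n) sort for two nested scans over the raw list.
import Mathlib
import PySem

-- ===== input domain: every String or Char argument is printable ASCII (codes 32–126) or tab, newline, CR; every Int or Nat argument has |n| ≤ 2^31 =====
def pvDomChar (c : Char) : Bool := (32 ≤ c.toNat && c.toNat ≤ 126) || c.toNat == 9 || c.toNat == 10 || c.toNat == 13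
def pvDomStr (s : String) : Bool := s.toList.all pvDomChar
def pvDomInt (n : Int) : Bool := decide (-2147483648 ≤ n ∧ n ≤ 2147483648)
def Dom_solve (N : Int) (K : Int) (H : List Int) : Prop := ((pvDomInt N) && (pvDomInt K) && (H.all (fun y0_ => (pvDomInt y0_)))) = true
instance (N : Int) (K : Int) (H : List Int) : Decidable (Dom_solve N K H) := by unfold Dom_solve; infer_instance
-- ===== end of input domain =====

-- B drops A's sort/dedup/adjacent-gap scan entirely: it returns NO iff some height h > start
-- has no "close predecessor" g in the raw list with start <= g < h <= g + start; objective: alternative.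

-- ===== PORT A =====
-- A's for-loop over range(1, len(H)) reading H[i], H[i-1] and the running lv,
-- as structural recursion carrying the previous element and lv; early 'return NO' kept.
def solveLoop : Int → Int → List Int → String
  | _, _, [] => "YES"
  | prev, lv, h :: t =>
    let lv' := lv + (h - prev)
    if lv' - 1 > prev then "NO" else solveLoop h lv' t

def solve (N : Int) (K : Int) (H : List Int) : String :=
  match PySem.List.pyGet? H (K - 1) with
  | none => "NO"   -- Python raises IndexError here; excluded by Pre_solve
  | some start =>
    match PySem.List.sorted (PySem.Set.ofList (H.filter (fun h => decide (h ≥ start)))) (fun x => x) false with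
    | [] => "YES"
    | h0 :: rest => solveLoop h0 1 rest

-- ===== PORT B =====
-- B: no sorting, no dedup; two nested scans over the raw list H.
def solve_alt (N : Int) (K : Int) (H : List Int) : String :=
  match PySem.List.pyGet? H (K - 1) with
  | none => "NO"   -- Python raises IndexError here; excluded by Pre_solve
  | some start =>
    if H.any (fun h => decide (h > start) &&
        ! (H.any (fun g => decide (start ≤ g) && decide (g < h) && decide (h ≤ g + start))))
    then "NO" else "YES"

-- ===== PRECONDITION & SPEC =====
-- A evaluates H[K-1]; Pre_ excludes exactly the inputs where that raises IndexError.
def Pre_solve (N : Int) (K : Int) (H : List Int) : Prop := PySem.Raise.InRange H.length (K - 1)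
instance (N : Int) (K : Int) (H : List Int) : Decidable (Pre_solve N K H) := by unfold Pre_solve; infer_instance

def pvWitness_solve : Int × Int × List Int := (4, 2, [2, 1, 4, 7])

def Spec_solve (N : Int) (K : Int) (H : List Int) (out : String) : Prop := out = solve_alt N K H
instance (N : Int) (K : Int) (H : List Int) (out : String) : Decidable (Spec_solve N K H out) := by unfold Spec_solve; infer_instance

-- ===== CLAIM (what is proved, stated in full; the proofs are below) =====
def Claim_equal_solve : Prop := ∀ (N : Int) (K : Int) (H : List Int), Dom_solve N K H → Pre_solve N K H → Spec_solve N K H (solve N K H)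

-- ===== LEMMAS AND PROOFS =====

-- A's telescoped loop with lv = 1 + (prev - start) equals the adjacent-gap test on the sorted list.
theorem solveLoop_eq_gap (start : Int) :
    ∀ (t : List Int) (prev : Int),
      solveLoop prev (1 + (prev - start)) t =
        if ((prev :: t).zip t).any (fun ab => decide (ab.2 - ab.1 > start)) then "NO" else "YES" := by
  intro t
  induction t with
  | nil => intro prev; simp [solveLoop]
  | cons h t ih =>
    intro prev
    simp only [solveLoop, List.zip_cons_cons, List.any_cons]
    by_cases hc : h - prev > start
    · have h1 : 1 + (prev - start) + (h - prev) - 1 > prev := by omega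
      rw [if_pos h1]
      simp [decide_eq_true hc]
    · have h1 : ¬ (1 + (prev - start) + (h - prev) - 1 > prev) := by omega
      have h3 : 1 + (prev - start) + (h - prev) = 1 + (h - start) := by ring
      rw [if_neg h1, h3, ih h]
      simp only [decide_eq_false hc, Bool.false_or]

-- head of sorted(set(filter)) is start
theorem head_sorted_filter (H : List Int) (start : Int) (hmem : start ∈ H)
    (h0 : Int) (rest : List Int)
    (heq : PySem.List.sorted (PySem.Set.ofList (H.filter (fun h => decide (h ≥ start)))) (fun x => x) false = h0 :: rest) :
    h0 = start := by
  have hstartf : start ∈ H.filter (fun h => decide (h ≥ start)) := by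
    simp [List.mem_filter, hmem]
  have hstartS : start ∈ PySem.Set.ofList (H.filter (fun h => decide (h ≥ start))) :=
    (PySem.Set.mem_ofList _ _).mpr hstartf
  have hle : h0 ≤ start := PySem.List.key_head_sorted_le _ _ heq start hstartS
  have hmem0 : h0 ∈ PySem.Set.ofList (H.filter (fun h => decide (h ≥ start))) := by
    have : h0 ∈ h0 :: rest := List.mem_cons_self
    rw [← heq] at this
    exact (PySem.List.mem_sorted _ _ _ _).mp this
  have : h0 ∈ H.filter (fun h => decide (h ≥ start)) := (PySem.Set.mem_ofList _ _).mp hmem0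
  have hge : h0 ≥ start := by
    have := (List.mem_filter.mp this).2
    simpa using this
  omega

-- The adjacent-gap test on a strictly sorted list U (with minimum = start, and membership
-- characterised by H) equals B's "no close predecessor" scan over the raw list H.
theorem gap_eq_alt (H : List Int) (start : Int) (U : List Int)
    (hU : U.Pairwise (· < ·))
    (hmem : ∀ x, x ∈ U ↔ (x ∈ H ∧ start ≤ x))
    (hne : U ≠ [])
    (hhead : U.head hne = start) :
    ((U.zip U.tail).any (fun ab => decide (ab.2 - ab.1 > start))) =
    (H.any (fun h => decide (h > start) &&
        ! (H.any (fun g => decide (start ≤ g) && decide (g < h) && decide (h ≤ g + start))))) := by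
  have hmono : ∀ (i j : ℕ) (hij : i < j) (hj : j < U.length), U[i]'(by omega) < U[j] := by
    intro i j hij hj
    exact List.pairwise_iff_getElem.mp hU i j (by omega) hj hij
  apply Bool.eq_iff_iff.mpr
  simp only [List.any_eq_true, Bool.and_eq_true, Bool.not_eq_true', List.any_eq_false,
    decide_eq_true_eq]
  constructor
  · rintro ⟨⟨a, b⟩, hab, hgap⟩
    -- adjacent pair with big gap: b is a witness for B
    obtain ⟨i, hi, hieq⟩ := List.mem_iff_getElem.mp hab
    have hiz : (U.zip U.tail).length = U.tail.length := by
      simp [List.length_zip, List.length_tail]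
    have hit : i < U.tail.length := by omega
    have hiU : i < U.length := by simp [List.length_tail] at hit; omega
    have hi1 : i + 1 < U.length := by simp [List.length_tail] at hit; omega
    have hza : a = U[i] := by
      have := List.getElem_zip (l := U) (l' := U.tail) (i := i) (h := hi)
      rw [hieq] at this; exact (congrArg Prod.fst this)
    have hzb : b = U[i + 1] := by
      have := List.getElem_zip (l := U) (l' := U.tail) (i := i) (h := hi)
      rw [hieq] at this
      have h2 := congrArg Prod.snd this
      simpa [List.getElem_tail] using h2
    have hablt : a < b := by rw [hza, hzb]; exact hmono i (i+1) (by omega) hi1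
    have haU : a ∈ U := by rw [hza]; exact List.getElem_mem _
    have hbU : b ∈ U := by rw [hzb]; exact List.getElem_mem _
    obtain ⟨hbH, hbs⟩ := (hmem b).mp hbU
    have has : start ≤ a := ((hmem a).mp haU).2
    refine ⟨b, hbH, by omega, ?_⟩
    rintro g hgH ⟨⟨hgs, hglt⟩, hble⟩
    -- g ∈ U and g < b = U[i+1], so g ≤ U[i] = a
    have hgU : g ∈ U := (hmem g).mpr ⟨hgH, hgs⟩
    obtain ⟨j, hj, hjeq⟩ := List.mem_iff_getElem.mp hgU
    have hji : j ≤ i := by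
      by_contra hcon
      have : U[i+1] ≤ U[j] := by
        rcases Nat.lt_or_ge (i+1) j with hlt | hge
        · exact le_of_lt (hmono (i+1) j hlt hj)
        · have : j = i + 1 := by omega
          subst this; exact le_refl _
      rw [hjeq, ← hzb] at this; omega
    have hga : g ≤ a := by
      rcases Nat.lt_or_ge j i with hlt | hge
      · have := hmono j i hlt hiU; rw [hjeq, ← hza] at this; omega
      · have : j = i := by omega
        subst this; rw [← hjeq, ← hza]
    omega
  · rintro ⟨h, hhH, hhs, hno⟩
    -- h has no close predecessor; its sorted predecessor realises a big gap
    have hhU : h ∈ U := (hmem h).mpr ⟨hhH, by omega⟩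
    obtain ⟨j, hj, hjeq⟩ := List.mem_iff_getElem.mp hhU
    have hj0 : j ≠ 0 := by
      intro h0
      subst h0
      have : U.head hne = U[0] := List.head_eq_getElem hne
      rw [hhead] at this
      rw [hjeq] at this
      omega
    obtain ⟨j', rfl⟩ : ∃ j', j = j' + 1 := ⟨j - 1, by omega⟩
    have hj' : j' < U.length := by omega
    set p := U[j']'hj' with hp
    have hplt : p < h := by rw [← hjeq]; exact hmono j' (j'+1) (by omega) hj
    have hpU : p ∈ U := List.getElem_mem _
    obtain ⟨hpH, hps⟩ := (hmem p).mp hpU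
    have hgap : h - p > start := by
      have := hno p hpH
      by_contra hc
      exact this ⟨⟨hps, hplt⟩, by omega⟩
    refine ⟨(p, h), ?_, by simp; omega⟩
    apply List.mem_iff_getElem.mpr
    have hit : j' < U.tail.length := by simp [List.length_tail]; omega
    refine ⟨j', by simp [List.length_zip, List.length_tail]; omega, ?_⟩
    have := List.getElem_zip (l := U) (l' := U.tail) (i := j')
      (h := by simp [List.length_zip, List.length_tail]; omega)
    rw [this]
    simp [List.getElem_tail, ← hp, ← hjeq]

-- ===== VERDICT (by name: the statement is the Claim_ definition above) =====
theorem solve_spec : Claim_equal_solve := by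
  intro N K H _ hpre
  unfold Spec_solve
  obtain ⟨start, hget⟩ : ∃ s, PySem.List.pyGet? H (K - 1) = some s := by
    rcases hov : PySem.List.pyGet? H (K - 1) with _ | s
    · exact absurd hpre ((PySem.List.pyGet?_eq_none_iff _ _).mp hov)
    · exact ⟨s, rfl⟩
  simp only [solve, solve_alt, hget]
  have hmemH : start ∈ H := PySem.List.mem_of_pyGet?_eq_some H hget
  rcases hs : PySem.List.sorted (PySem.Set.ofList (H.filter (fun h => decide (h ≥ start)))) (fun x => x) false with _ | ⟨h0, rest⟩
  · -- sorted list empty: but start is in the underlying set, contradiction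
    exfalso
    have : start ∈ PySem.List.sorted (PySem.Set.ofList (H.filter (fun h => decide (h ≥ start)))) (fun x => x) false := by
      apply (PySem.List.mem_sorted _ _ _ _).mpr
      apply (PySem.Set.mem_ofList _ _).mpr
      simp [List.mem_filter, hmemH]
    rw [hs] at this
    simp at this
  · have hh0 : h0 = start := head_sorted_filter H start hmemH h0 rest hs
    have hlv : (1 : Int) = 1 + (h0 - start) := by omega
    show solveLoop h0 1 rest = _
    rw [hlv, solveLoop_eq_gap]
    have hpair : (h0 :: rest).Pairwise (· < ·) := by
      rw [← hs]; exact PySem.List.sorted_ofList_pairwise_lt _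
    have hmemU : ∀ x, x ∈ (h0 :: rest) ↔ (x ∈ H ∧ start ≤ x) := by
      intro x
      rw [← hs, PySem.List.mem_sorted, PySem.Set.mem_ofList, List.mem_filter]
      simp
    have hne : (h0 :: rest) ≠ [] := by simp
    have := gap_eq_alt H start (h0 :: rest) hpair hmemU hne (by simp [hh0])
    simp only [List.tail_cons] at this
    rw [this]
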